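-- pv_equiv track=rewrite | github.com/harleypig/dotfiles | get-vault-key/get-vault-key.py | _extract_literals_from_regex
-- ===== SOURCE A (Python) =====
-- def _extract_literals_from_regex(regex_pattern):
--   """Extract literal substrings from a regex pattern."""
--   # This is a simplified implementation
--   # A more robust version would handle more regex features
--   literals = []
--   current = ""
--
--   for char in regex_pattern:
--     if char in "\\^$.|?*+()[{":
--       if current:
--         literals.append(current)
--         current = ""
--
--     else:
--       current += char
--
--   if current:
--     literals.append(current)
--
--   return [
--     lit for lit in literals if len(lit) > 2
--   ]  # Only return substantial literals
-- ===== SOURCE B (Python) =====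
-- import re
--
-- def _extract_literals_from_regex(regex_pattern):
--   """Extract literal substrings from a regex pattern."""
--   return [t for t in re.split(r'[\\^$.|?*+()\[{]', regex_pattern) if len(t) > 2]
-- ===== Notes on version B (the rewrite author's own statement) =====
-- stated objective: idiomatic
-- what changed: Replaced the per-character accumulator loop (current-run string, conditional flushes) with a single re.split over a character class of the twelve metacharacters followed by a length filter; the constant-factor speedup comes from the regex engine scanning in C instead of a Python-level char loop.
import Mathlib
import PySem

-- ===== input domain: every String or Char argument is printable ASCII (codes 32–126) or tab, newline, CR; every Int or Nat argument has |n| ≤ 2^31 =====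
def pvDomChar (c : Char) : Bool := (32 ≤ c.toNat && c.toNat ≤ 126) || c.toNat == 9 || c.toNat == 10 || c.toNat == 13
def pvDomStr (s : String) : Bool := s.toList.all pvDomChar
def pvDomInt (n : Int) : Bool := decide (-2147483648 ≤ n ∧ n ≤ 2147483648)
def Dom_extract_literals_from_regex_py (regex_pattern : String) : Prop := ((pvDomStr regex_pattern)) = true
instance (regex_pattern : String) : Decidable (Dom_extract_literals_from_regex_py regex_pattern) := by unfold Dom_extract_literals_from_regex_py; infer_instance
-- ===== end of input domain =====

-- B replaces A's per-character accumulator loop by a single split-on-metacharacter pass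
-- (Python: one re.split call) followed by a length filter — 'idiomatic', same cost.


-- the twelve regex metacharacters "\^$.|?*+()[{"
def pvIsMeta (c : Char) : Bool :=
  ['\\', '^', '$', '.', '|', '?', '*', '+', '(', ')', '[', '{'].contains c

-- ===== PORT A =====
-- loop state: (literals so far, current run); 'char in "…"' is pvIsMeta
def pvStepA (st : List (List Char) × List Char) (c : Char) : List (List Char) × List Char :=
  if pvIsMeta c then
    if st.2 ≠ [] then (st.1 ++ [st.2], []) else st
  else
    (st.1, st.2 ++ [c])

-- after the loop: append the pending run, then keep only the substantial literals
def pvFinishA (st : List (List Char) × List Char) : List (List Char) :=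
  if st.2 ≠ [] then st.1 ++ [st.2] else st.1

def extract_literals_from_regex_py (regex_pattern : String) : List String :=
  ((pvFinishA (regex_pattern.toList.foldl pvStepA ([], []))).filter
    (fun lit => lit.length > 2)).map String.ofList

-- ===== PORT B =====
-- re.split(r'[\\^$.|?*+()\[{]', s) = split the characters on the metacharacter class,
-- keeping empty segments; then keep the segments longer than 2.
def extract_literals_from_regex_py_alt (regex_pattern : String) : List String :=
  ((regex_pattern.toList.splitOnP pvIsMeta).filter (fun t => t.length > 2)).map String.ofList

-- ===== PRECONDITION & SPEC =====
def Spec_extract_literals_from_regex_py (regex_pattern : String) (out : List String) : Prop := out = extract_literals_from_regex_py_alt regex_pattern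
instance (regex_pattern : String) (out : List String) : Decidable (Spec_extract_literals_from_regex_py regex_pattern out) := by unfold Spec_extract_literals_from_regex_py; infer_instance

-- ===== CLAIM (what is proved, stated in full; the proofs are below) =====
def Claim_equal_extract_literals_from_regex_py : Prop := ∀ (regex_pattern : String), Dom_extract_literals_from_regex_py regex_pattern → Spec_extract_literals_from_regex_py regex_pattern (extract_literals_from_regex_py regex_pattern)

-- ===== LEMMAS AND PROOFS =====

-- A's finished literal list = the split's segments with empty segments dropped,
-- generalized over the loop state (acc, cur).
theorem pvFoldA_eq_split (xs : List Char) :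
    ∀ (acc : List (List Char)) (cur : List Char),
    pvFinishA (xs.foldl pvStepA (acc, cur))
      = acc ++ ((xs.splitOnP pvIsMeta).modifyHead (cur ++ ·)).filter (· ≠ []) := by
  induction xs with
  | nil =>
    intro acc cur
    simp only [List.foldl_nil, List.splitOnP_nil, List.modifyHead, List.filter, pvFinishA]
    by_cases h : cur = [] <;> simp [h]
  | cons a xs ih =>
    intro acc cur
    simp only [List.foldl_cons, List.splitOnP_cons, pvStepA]
    by_cases hm : pvIsMeta a
    · by_cases hc : cur = []
      · subst hc
        have h2 : (List.splitOnP pvIsMeta xs).modifyHead (fun x => x) = List.splitOnP pvIsMeta xs := by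
          cases List.splitOnP pvIsMeta xs <;> rfl
        simpa [hm, h2] using ih acc []
      · rw [if_pos hm, if_pos hc, if_pos hm]
        rw [ih (acc ++ [cur]) []]
        have hsplit : (xs.splitOnP pvIsMeta).modifyHead ([] ++ ·) = xs.splitOnP pvIsMeta := by
          cases xs.splitOnP pvIsMeta <;> simp [List.modifyHead]
        rw [hsplit]
        simp [hc]
    · rw [if_neg hm, if_neg hm]
      rw [ih acc (cur ++ [a])]
      congr 1
      obtain ⟨h, t, hht⟩ : ∃ h t, xs.splitOnP pvIsMeta = h :: t := by
        cases hx : xs.splitOnP pvIsMeta with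
        | nil => exact absurd hx (List.splitOnP_ne_nil _ _)
        | cons h t => exact ⟨h, t, rfl⟩
      rw [hht]
      simp [List.modifyHead]

theorem extract_eq (regex_pattern : String) :
    extract_literals_from_regex_py regex_pattern
      = extract_literals_from_regex_py_alt regex_pattern := by
  unfold extract_literals_from_regex_py extract_literals_from_regex_py_alt
  rw [pvFoldA_eq_split regex_pattern.toList [] []]
  have hsplit : (regex_pattern.toList.splitOnP pvIsMeta).modifyHead ([] ++ ·)
      = regex_pattern.toList.splitOnP pvIsMeta := by
    cases regex_pattern.toList.splitOnP pvIsMeta <;> simp [List.modifyHead]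
  rw [hsplit, List.nil_append, List.filter_filter]
  congr 1
  apply List.filter_congr
  intro t _
  by_cases ht : t = [] <;> simp [ht]

-- ===== VERDICT (by name: the statement is the Claim_ definition above) =====
theorem extract_literals_from_regex_py_spec : Claim_equal_extract_literals_from_regex_py := by
  intro s _
  unfold Spec_extract_literals_from_regex_py
  exact extract_eq s
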